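-- pv_equiv track=rewrite | github.com/Apurba003/mfa-webapp | keystroke_dynamics.py | _extract_inter_key_intervals
-- ===== SOURCE A (Python) =====
-- def _extract_inter_key_intervals(timestamps, events):
--     """Extract inter-key intervals"""
--     intervals = []
--     keydown_times = [t for i, t in enumerate(timestamps) if events[i] == 'keydown']
--
--     for i in range(1, len(keydown_times)):
--         interval = keydown_times[i] - keydown_times[i - 1]
--         if interval > 0:
--             intervals.append(interval)
--
--     return intervals
-- ===== SOURCE B (Python) =====
-- def _extract_inter_key_intervals(timestamps, events):
--     """Right-to-left scan: pair each keydown with the keydown that follows it,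
--     emit positive gaps back-to-front, then reverse; no intermediate list."""
--     out = []
--     nxt = None
--     for i in range(len(timestamps) - 1, -1, -1):
--         if events[i] == 'keydown':
--             t = timestamps[i]
--             if nxt is not None and nxt - t > 0:
--                 out.append(nxt - t)
--             nxt = t
--     out.reverse()
--     return out
-- ===== Notes on version B (the rewrite author's own statement) =====
-- stated objective: alternative
-- what changed: B traverses the input right-to-left in a single index loop, carrying only the NEXT keydown timestamp and emitting positive gaps back-to-front, then reverses the result; A first materialises the forward keydown_times list and then runs a second forward index loop over consecutive pairs.
import Mathlib
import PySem

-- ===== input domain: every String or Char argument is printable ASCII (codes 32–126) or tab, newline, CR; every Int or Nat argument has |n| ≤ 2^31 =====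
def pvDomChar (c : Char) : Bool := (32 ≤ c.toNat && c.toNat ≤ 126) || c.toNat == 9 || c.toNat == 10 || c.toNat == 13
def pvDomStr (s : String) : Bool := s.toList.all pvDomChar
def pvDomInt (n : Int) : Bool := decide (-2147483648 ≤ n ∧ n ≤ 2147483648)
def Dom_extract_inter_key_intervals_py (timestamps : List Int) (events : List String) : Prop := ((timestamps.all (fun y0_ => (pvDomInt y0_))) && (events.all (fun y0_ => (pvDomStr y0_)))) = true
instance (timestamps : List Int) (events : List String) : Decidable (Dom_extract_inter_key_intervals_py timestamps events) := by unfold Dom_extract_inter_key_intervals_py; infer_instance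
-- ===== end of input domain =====

-- B replaces A's build-keydown-list-then-forward-index-diff structure by a single
-- right-to-left index scan carrying only the next keydown timestamp, emitting the
-- positive gaps back-to-front and reversing once at the end (alternative decomposition).


-- ===== PORT A =====
def extract_inter_key_intervals_py (timestamps : List Int) (events : List String) : List Int :=
  let keydown_times := ((PySem.List.enumerate timestamps 0).filter
      (fun p => PySem.List.pyGetD events p.1 "" == "keydown")).map (·.2)
  (PySem.List.pyRange 1 (keydown_times.length : Int) 1).foldl
    (fun acc i =>
      let interval := PySem.List.pyGetD keydown_times i 0 - PySem.List.pyGetD keydown_times (i - 1) 0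
      if interval > 0 then acc ++ [interval] else acc) []

-- ===== PORT B =====
def extract_inter_key_intervals_py_alt (timestamps : List Int) (events : List String) : List Int :=
  (((PySem.List.pyRange ((timestamps.length : Int) - 1) (-1) (-1)).foldl
    (fun st i =>
      if PySem.List.pyGetD events i "" == "keydown" then
        let t := PySem.List.pyGetD timestamps i 0
        match st.1 with
        | some nxt => (some t, if nxt - t > 0 then st.2 ++ [nxt - t] else st.2)
        | none => (some t, st.2)
      else st) ((none : Option Int), ([] : List Int))).2).reverse

-- ===== PRECONDITION & SPEC =====
-- A raises IndexError (events[i]) whenever events is shorter than timestamps; Pre_ excludes exactly that.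
def Pre_extract_inter_key_intervals_py (timestamps : List Int) (events : List String) : Prop :=
  timestamps.length ≤ events.length
instance (timestamps : List Int) (events : List String) : Decidable (Pre_extract_inter_key_intervals_py timestamps events) := by unfold Pre_extract_inter_key_intervals_py; infer_instance

def pvWitness_extract_inter_key_intervals_py : List Int × List String :=
  ([1, 3, 2, 10], ["keydown", "keyup", "keydown", "keydown"])

def Spec_extract_inter_key_intervals_py (timestamps : List Int) (events : List String) (out : List Int) : Prop := out = extract_inter_key_intervals_py_alt timestamps events
instance (timestamps : List Int) (events : List String) (out : List Int) : Decidable (Spec_extract_inter_key_intervals_py timestamps events out) := by unfold Spec_extract_inter_key_intervals_py; infer_instance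

-- ===== CLAIM (what is proved, stated in full; the proofs are below) =====
def Claim_equal_extract_inter_key_intervals_py : Prop := ∀ (timestamps : List Int) (events : List String), Dom_extract_inter_key_intervals_py timestamps events → Pre_extract_inter_key_intervals_py timestamps events → Spec_extract_inter_key_intervals_py timestamps events (extract_inter_key_intervals_py timestamps events)

-- ===== LEMMAS AND PROOFS =====

-- A's inner loop over an arbitrary keydown-times list, as a standalone function.
def pvAloop (kt : List Int) : List Int :=
  (PySem.List.pyRange 1 (kt.length : Int) 1).foldl
    (fun acc i =>
      let interval := PySem.List.pyGetD kt i 0 - PySem.List.pyGetD kt (i - 1) 0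
      if interval > 0 then acc ++ [interval] else acc) []

-- Clean structural spec: positive diffs of consecutive elements.
def pvDiffs : List Int → List Int
  | a :: b :: r => (if b - a > 0 then [b - a] else []) ++ pvDiffs (b :: r)
  | _ => []

-- B's step on a (timestamp, event) pair.
def pvStepPair (st : Option Int × List Int) (p : Int × String) : Option Int × List Int :=
  if p.2 == "keydown" then
    match st.1 with
    | some nxt => (some p.1, if nxt - p.1 > 0 then st.2 ++ [nxt - p.1] else st.2)
    | none => (some p.1, st.2)
  else st

-- B's step specialised to a bare keydown timestamp.
def pvStepR (st : Option Int × List Int) (t : Int) : Option Int × List Int :=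
  match st.1 with
  | some nxt => (some t, if nxt - t > 0 then st.2 ++ [nxt - t] else st.2)
  | none => (some t, st.2)

theorem pvFilterEq (ts : List Int) (pre es : List String) (h : ts.length ≤ es.length) :
    ((PySem.List.enumerate ts ((pre.length : Int))).filter
        (fun p => PySem.List.pyGetD (pre ++ es) p.1 "" == "keydown")).map (·.2)
      = ((ts.zip es).filter (fun p => p.2 == "keydown")).map (·.1) := by
  induction ts generalizing pre es with
  | nil => simp [PySem.List.enumerate_nil]
  | cons t ts ih =>
    cases es with
    | nil => simp at h
    | cons e es =>
      have hg : PySem.List.pyGetD (pre ++ e :: es) ((pre.length : Int)) "" = e := by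
        simp [PySem.List.pyGetD]
      have hrec := ih (pre ++ [e]) es (by simpa using Nat.le_of_succ_le_succ h)
      rw [show (((pre ++ [e]).length : Nat) : Int) = (pre.length : Int) + 1 by simp,
          show (pre ++ [e]) ++ es = pre ++ e :: es by simp] at hrec
      rw [PySem.List.enumerate_cons]
      simp only [List.filter_cons, List.zip_cons_cons, hg]
      by_cases hk : e == "keydown"
      · simp [hk, hrec]
      · simp [hk, hrec]

-- the (timestamp, event) pairs indexed by range(len ts) are exactly zip ts es
theorem pvMapZip (ts : List Int) (es : List String) (h : ts.length ≤ es.length) :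
    (PySem.List.pyRange 0 ((ts.length : Int)) 1).map
        (fun i => (PySem.List.pyGetD ts i 0, PySem.List.pyGetD es i "")) = ts.zip es := by
  apply List.ext_getElem
  · simp [PySem.List.length_pyRange_one, List.length_zip, List.length_map]
    omega
  · intro k h1 h2
    have hk : k < ts.length := by
      simpa [PySem.List.length_pyRange_one] using h1
    rw [List.getElem_map, PySem.List.getElem_pyRange_one, List.getElem_zip]
    have h3 : (0 : Int) + k = (k : Int) := by omega
    rw [h3, PySem.List.pyGetD_eq_getElem ts 0 (by omega) (by exact_mod_cast hk),
        PySem.List.pyGetD_eq_getElem es "" (by omega) (by exact_mod_cast (show k < es.length by omega))]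
    simp

-- non-keydown pairs are skipped: fold over pairs = fold over keydown timestamps
theorem pvSkipEq (l : List (Int × String)) (st : Option Int × List Int) :
    l.foldl pvStepPair st
      = ((l.filter (fun p => p.2 == "keydown")).map (·.1)).foldl pvStepR st := by
  induction l generalizing st with
  | nil => rfl
  | cons p l ih =>
    by_cases hk : p.2 == "keydown"
    · simp only [List.foldl_cons, List.filter_cons, hk, if_pos, List.map_cons]
      rw [ih]
      congr 1
      simp [pvStepPair, pvStepR, hk]
    · simp only [List.foldl_cons, List.filter_cons, hk]
      rw [ih]
      congr 1
      simp [pvStepPair, hk]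

-- the reverse fold computes (head of kt, reversed diffs)
theorem pvRevMain (kt : List Int) :
    kt.reverse.foldl pvStepR (none, []) = (kt.head?, (pvDiffs kt).reverse) := by
  induction kt with
  | nil => simp [pvDiffs]
  | cons a l ih =>
    rw [List.reverse_cons, List.foldl_append, ih]
    cases l with
    | nil => simp [pvStepR, pvDiffs]
    | cons h l' =>
      simp only [List.head?_cons, List.foldl_cons, List.foldl_nil, pvStepR]
      simp only [pvDiffs, List.reverse_append]
      split_ifs <;> simp

theorem pvGetD_stable (l : List Int) (x : Int) (i : Int) (h0 : 0 ≤ i) (h1 : i < l.length) :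
    PySem.List.pyGetD (l ++ [x]) i 0 = PySem.List.pyGetD l i 0 := by
  rw [PySem.List.pyGetD_eq_getElem (l ++ [x]) 0 (by omega) (by simp; omega),
      PySem.List.pyGetD_eq_getElem l 0 h0 (by exact_mod_cast h1)]
  rw [List.getElem_append_left (by omega)]

theorem pvAloop_snoc (l : List Int) (x : Int) (prev : Int) (hl : l.getLast? = some prev) :
    pvAloop (l ++ [x]) = if x - prev > 0 then pvAloop l ++ [x - prev] else pvAloop l := by
  have hne : l ≠ [] := by intro h; simp [h] at hl
  have hlen : 1 ≤ l.length := List.length_pos_iff.mpr hne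
  unfold pvAloop
  have h1 : ((l ++ [x]).length : Int) = (l.length : Int) + 1 := by simp
  rw [h1, PySem.List.pyRange_one_succ_right (by exact_mod_cast hlen), List.foldl_append]
  have hpre : (PySem.List.pyRange 1 (l.length : Int) 1).foldl
      (fun acc i =>
        let interval := PySem.List.pyGetD (l ++ [x]) i 0 - PySem.List.pyGetD (l ++ [x]) (i - 1) 0
        if interval > 0 then acc ++ [interval] else acc) []
      = (PySem.List.pyRange 1 (l.length : Int) 1).foldl
      (fun acc i =>
        let interval := PySem.List.pyGetD l i 0 - PySem.List.pyGetD l (i - 1) 0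
        if interval > 0 then acc ++ [interval] else acc) [] := by
    apply PySem.List.foldl_congr_mem
    intro acc i hi
    have hmem := (PySem.List.mem_pyRange_one).mp hi
    rw [pvGetD_stable l x i (by omega) (by omega),
        pvGetD_stable l x (i - 1) (by omega) (by omega)]
  rw [hpre]
  have hx : PySem.List.pyGetD (l ++ [x]) ((l.length : Int)) 0 = x := by
    rw [PySem.List.pyGetD_eq_getElem (l ++ [x]) 0 (by omega) (by simp)]
    simp
  have hp : PySem.List.pyGetD (l ++ [x]) ((l.length : Int) - 1) 0 = prev := by
    rw [pvGetD_stable l x ((l.length : Int) - 1) (by omega) (by omega)]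
    rw [PySem.List.pyGetD_eq_getElem l 0 (by omega) (by omega)]
    have := List.getLast?_eq_getElem? (l := l)
    rw [hl] at this
    have h2 : l[l.length - 1]? = some prev := this.symm
    have h3 : ((l.length : Int) - 1).toNat = l.length - 1 := by omega
    have h4 : l[((l.length : Int) - 1).toNat]? = some prev := by rw [h3]; exact h2
    exact (List.getElem?_eq_some_iff.mp h4).2
  simp only [List.foldl_cons, List.foldl_nil, hx, hp]

theorem pvDiffs_snoc (l : List Int) (x : Int) (prev : Int) (hl : l.getLast? = some prev) :
    pvDiffs (l ++ [x]) = if x - prev > 0 then pvDiffs l ++ [x - prev] else pvDiffs l := by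
  induction l with
  | nil => simp at hl
  | cons a l ih =>
    cases l with
    | nil =>
      simp only [List.getLast?_singleton, Option.some.injEq] at hl
      subst hl
      by_cases hd : x - a > 0 <;> simp [pvDiffs]
    | cons b l' =>
      have hl' : (b :: l').getLast? = some prev := by
        simpa [List.getLast?_cons_cons] using hl
      have := ih hl'
      simp only [List.cons_append, pvDiffs] at *
      rw [this]
      split_ifs <;> simp

theorem pvAloop_eq_diffs (kt : List Int) : pvAloop kt = pvDiffs kt := by
  induction kt using List.reverseRecOn with
  | nil => simp [pvAloop, pvDiffs, PySem.List.pyRange_one_eq_nil]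
  | append_singleton l x ih =>
    cases hl : l.getLast? with
    | none =>
      have : l = [] := List.getLast?_eq_none_iff.mp hl
      subst this
      simp [pvAloop, pvDiffs, PySem.List.pyRange_one_eq_nil]
    | some prev =>
      rw [pvAloop_snoc l x prev hl, pvDiffs_snoc l x prev hl, ih]

theorem pvBside (ts : List Int) (es : List String) (h : ts.length ≤ es.length) :
    extract_inter_key_intervals_py_alt ts es
      = pvDiffs (((ts.zip es).filter (fun p => p.2 == "keydown")).map (·.1)) := by
  unfold extract_inter_key_intervals_py_alt
  rw [PySem.List.pyRange_neg_one_eq_reverse,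
      show (-1 : Int) + 1 = 0 from by norm_num,
      show ((ts.length : Int) - 1) + 1 = (ts.length : Int) from by ring]
  have hstep : (fun (st : Option Int × List Int) (i : Int) =>
      if PySem.List.pyGetD es i "" == "keydown" then
        let t := PySem.List.pyGetD ts i 0
        match st.1 with
        | some nxt => (some t, if nxt - t > 0 then st.2 ++ [nxt - t] else st.2)
        | none => (some t, st.2)
      else st)
      = (fun st i => pvStepPair st (PySem.List.pyGetD ts i 0, PySem.List.pyGetD es i "")) := by
    funext st i
    simp [pvStepPair]
  rw [hstep, ← List.foldl_map, List.map_reverse, pvMapZip ts es h, pvSkipEq,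
      List.filter_reverse, List.map_reverse, pvRevMain]
  simp

-- ===== VERDICT (by name: the statement is the Claim_ definition above) =====
theorem extract_inter_key_intervals_py_spec : Claim_equal_extract_inter_key_intervals_py := by
  intro ts es _ hpre
  unfold Spec_extract_inter_key_intervals_py
  have hA := pvFilterEq ts ([] : List String) es hpre
  simp only [List.length_nil, Int.ofNat_zero, List.nil_append] at hA
  rw [pvBside ts es hpre]
  calc extract_inter_key_intervals_py ts es
      = pvAloop (((PySem.List.enumerate ts 0).filter
          (fun p => PySem.List.pyGetD es p.1 "" == "keydown")).map (·.2)) := rfl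
    _ = pvDiffs (((ts.zip es).filter (fun p => p.2 == "keydown")).map (·.1)) := by
        rw [← pvAloop_eq_diffs]
        exact congrArg pvAloop hA
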